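-- pv_equiv track=rewrite | github.com/lujinhong/machine-learning-project | utils/nlp_utils.py | preprocess_nmt
-- ===== SOURCE A (Python) =====
-- def preprocess_nmt(text):
--     """预处理机器翻译数据集"""
--     # 只保留数据集中的第一第二列
--     sub_text = ''
--     for line in text:
--         sub_text += line.split('\t')[0] + '\t' + line.split('\t')[1] + '\n'
--     # 使用一个空格代替连续的多个空格
--     # 字母改为小写
--     sub_text = sub_text.replace('\u202f', ' ').replace('\xa0', ' ').lower()
--     # 在单词和标点符号之间插入空格
--     out = [' ' + char if i > 0 and (char in set(',.!?') and sub_text[i-1] != ' ') else char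
--            for i,char in enumerate(sub_text)]
--     return ''.join(out)
-- ===== SOURCE B (Python) =====
-- def preprocess_nmt(text):
--     # stage one: first two tab-columns per line, assembled once and joined
--     rows = []
--     for line in text:
--         c = line.split('\t')
--         rows.append(c[0] + '\t' + c[1])
--     s = ('\n'.join(rows) + '\n') if text else ''
--     s = s.replace('\u202f', ' ').replace('\xa0', ' ').lower()
--     # stage two: split on spaces; inside a token the previous char is never a
--     # space, so a space goes before EVERY punctuation mark except at the token
--     # head (where the original predecessor was a space or the string start) --
--     # done with context-free replaces on the token tail, no per-char scan.
--     toks = []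
--     for tok in s.split(' '):
--         tail = tok[1:]
--         for p in ',.!?':
--             tail = tail.replace(p, ' ' + p)
--         toks.append(tok[:1] + tail)
--     return ' '.join(toks)
-- ===== Notes on version B (the rewrite author's own statement) =====
-- stated objective: alternative
-- what changed: Stage one splits each line once and joins the collected rows with '\n' instead of repeated string concatenation with a double split; stage two drops A's per-character indexed scan entirely: the string is split on spaces and inside each token (where the previous character is never a space) a space is inserted before every punctuation mark via context-free str.replace calls on the token tail, then the tokens are rejoined with spaces.
import Mathlib
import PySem

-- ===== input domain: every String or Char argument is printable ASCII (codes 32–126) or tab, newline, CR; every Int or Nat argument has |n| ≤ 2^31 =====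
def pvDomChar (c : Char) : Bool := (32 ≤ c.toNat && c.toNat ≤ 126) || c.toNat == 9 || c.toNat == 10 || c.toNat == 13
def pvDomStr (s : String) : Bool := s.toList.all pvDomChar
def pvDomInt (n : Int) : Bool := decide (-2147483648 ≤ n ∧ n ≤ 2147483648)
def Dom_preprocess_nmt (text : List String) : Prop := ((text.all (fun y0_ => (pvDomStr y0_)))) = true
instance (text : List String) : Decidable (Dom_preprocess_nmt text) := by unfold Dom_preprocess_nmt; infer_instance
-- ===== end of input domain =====

-- B: same task, different structure — stage one joins per-line column pairs, and stage two
-- replaces A's per-character indexed scan by split-on-space + context-free replaces per token.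

-- ',.!?' membership (used by port A's comprehension test)
def pvPunct (c : Char) : Bool := c == ',' || c == '.' || c == '!' || c == '?'

-- ===== PORT A =====
def preprocess_nmt (text : List String) : String :=
  -- sub_text built by += with line.split('\t') evaluated twice, as in A
  let sub_text : List Char := text.foldl (fun acc line =>
    acc ++ PySem.List.pyGetD (PySem.Chars.splitOn line.toList ['\t']) 0 []
        ++ ['\t']
        ++ PySem.List.pyGetD (PySem.Chars.splitOn line.toList ['\t']) 1 []
        ++ ['\n']) []
  let sub_text := PySem.Chars.lower
    (PySem.Chars.replace (PySem.Chars.replace sub_text ['\u202f'] [' ']) ['\xa0'] [' '])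
  let out : List (List Char) := (PySem.List.enumerate sub_text 0).map (fun p =>
    if 0 < p.1 ∧ pvPunct p.2 ∧ PySem.List.pyGetD sub_text (p.1 - 1) ' ' ≠ ' '
    then [' ', p.2] else [p.2])
  String.ofList (PySem.Chars.join [] out)

-- ===== PORT B =====
def preprocess_nmt_alt (text : List String) : String :=
  let rows : List (List Char) := text.map (fun line =>
    let c := PySem.Chars.splitOn line.toList ['\t']
    PySem.List.pyGetD c 0 [] ++ ['\t'] ++ PySem.List.pyGetD c 1 [])
  let s : List Char := if text = [] then [] else PySem.Chars.join ['\n'] rows ++ ['\n']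
  let s := PySem.Chars.lower
    (PySem.Chars.replace (PySem.Chars.replace s ['\u202f'] [' ']) ['\xa0'] [' '])
  let toks : List (List Char) := (PySem.Chars.splitOn s [' ']).map (fun tok =>
    PySem.List.slice tok none (some 1) ++
      [',', '.', '!', '?'].foldl (fun tail p => PySem.Chars.replace tail [p] [' ', p])
        (PySem.List.slice tok (some 1) none))
  String.ofList (PySem.Chars.join [' '] toks)

-- ===== PRECONDITION & SPEC =====
-- A raises IndexError on any line without a tab (split('\t')[1]); exactly those inputs are excluded.
def Pre_preprocess_nmt (text : List String) : Prop :=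
  ∀ line ∈ text, '\t' ∈ line.toList
instance (text : List String) : Decidable (Pre_preprocess_nmt text) := by
  unfold Pre_preprocess_nmt; infer_instance
def pvWitness_preprocess_nmt : List String := ["Go .\tVa !", "Hi,\tSalut ."]

def Spec_preprocess_nmt (text : List String) (out : String) : Prop := out = preprocess_nmt_alt text
instance (text : List String) (out : String) : Decidable (Spec_preprocess_nmt text out) := by unfold Spec_preprocess_nmt; infer_instance

-- ===== CLAIM (what is proved, stated in full; the proofs are below) =====
def Claim_equal_preprocess_nmt : Prop := ∀ (text : List String), Dom_preprocess_nmt text → Pre_preprocess_nmt text → Spec_preprocess_nmt text (preprocess_nmt text)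

-- ===== LEMMAS AND PROOFS =====

-- proof-only helpers
def pvIns (c : Char) : List Char := if pvPunct c then [' ', c] else [c]

-- reference one-pass insertion: pvH prev cs
def pvH : Char → List Char → List Char
  | _, [] => []
  | p, c :: t => (if pvPunct c && decide (p ≠ ' ') then [' ', c] else [c]) ++ pvH c t

-- reference single-char split (cur = reversed current token)
def pvF (a : Char) : List Char → List Char → List (List Char)
  | [], cur => [cur.reverse]
  | c :: t, cur => if c = a then cur.reverse :: pvF a t [] else pvF a t (c :: cur)

theorem pvF_cons_sep (a : Char) (t cur : List Char) :
    pvF a (a :: t) cur = cur.reverse :: pvF a t [] := by simp [pvF]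

theorem pvF_cons_ne (a c : Char) (t cur : List Char) (h : ¬ c = a) :
    pvF a (c :: t) cur = pvF a t (c :: cur) := by simp [pvF, h]

-- what B does to one token
def pvFix (tok : List Char) : List Char := tok.take 1 ++ tok.tail.flatMap pvIns

-- ---- characterisation of PySem.Chars.replace with a single-char pattern ----
theorem pv_replace_go_nil (a : Char) (new acc : List Char) (fuel : Nat) :
    PySem.Chars.replace.go [a] new fuel [] acc = acc.reverse := by
  cases fuel <;> rw [PySem.Chars.replace.go] <;> simp

theorem pv_replace_go_cons (a : Char) (new : List Char) (fuel : Nat) (c : Char) (t acc : List Char) :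
    PySem.Chars.replace.go [a] new (fuel+1) (c::t) acc
    = if c = a then PySem.Chars.replace.go [a] new fuel t (new.reverse ++ acc)
      else PySem.Chars.replace.go [a] new fuel t (c :: acc) := by
  rw [PySem.Chars.replace.go]
  by_cases h : c = a
  · simp [List.isPrefixOf, h]
  · simp [List.isPrefixOf, h, Ne.symm h]

theorem pv_replace_go (a : Char) (new : List Char) :
    ∀ (l : List Char) (fuel : Nat) (acc : List Char), l.length ≤ fuel →
      PySem.Chars.replace.go [a] new fuel l acc
      = acc.reverse ++ l.flatMap (fun c => if c = a then new else [c]) := by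
  intro l
  induction l with
  | nil => intro fuel acc _; simp [pv_replace_go_nil]
  | cons c t ih =>
    intro fuel acc hf
    cases fuel with
    | zero => simp at hf
    | succ m =>
      rw [pv_replace_go_cons]
      by_cases h : c = a <;>
        simp [h, ih _ _ (by simpa using Nat.le_of_succ_le_succ hf)]

theorem pv_replace_single (a : Char) (new l : List Char) :
    PySem.Chars.replace l [a] new = l.flatMap (fun c => if c = a then new else [c]) := by
  rw [PySem.Chars.replace]
  simp [pv_replace_go a new l l.length [] (le_refl _)]

-- ---- characterisation of PySem.Chars.splitOn with a single-char separator ----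
theorem pv_split_go_nil (a : Char) (cur : List Char) (acc : List (List Char)) (fuel : Nat) :
    PySem.Chars.splitOn.go [a] fuel [] cur acc = (cur.reverse :: acc).reverse := by
  cases fuel <;> rw [PySem.Chars.splitOn.go] <;> simp

theorem pv_split_go_cons (a : Char) (fuel : Nat) (c : Char) (t cur : List Char) (acc : List (List Char)) :
    PySem.Chars.splitOn.go [a] (fuel+1) (c::t) cur acc
    = if c = a then PySem.Chars.splitOn.go [a] fuel t [] (cur.reverse :: acc)
      else PySem.Chars.splitOn.go [a] fuel t (c :: cur) acc := by
  rw [PySem.Chars.splitOn.go]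
  by_cases h : c = a
  · simp [List.isPrefixOf, h]
  · simp [List.isPrefixOf, h, Ne.symm h]

theorem pv_split_go (a : Char) :
    ∀ (l : List Char) (fuel : Nat) (cur : List Char) (acc : List (List Char)), l.length < fuel →
      PySem.Chars.splitOn.go [a] fuel l cur acc = acc.reverse ++ pvF a l cur := by
  intro l
  induction l with
  | nil => intro fuel cur acc _; simp [pv_split_go_nil, pvF]
  | cons c t ih =>
    intro fuel cur acc hf
    cases fuel with
    | zero => simp at hf
    | succ m =>
      rw [pv_split_go_cons]
      by_cases h : c = a <;>
        simp [h, pvF, ih _ _ _ (by simpa using Nat.lt_of_succ_lt_succ hf)]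

theorem pv_split_single (a : Char) (l : List Char) :
    PySem.Chars.splitOn l [a] = pvF a l [] := by
  rw [PySem.Chars.splitOn]
  simp [pv_split_go a l (l.length + 1) [] [] (by omega)]

-- pvF facts
theorem pv_F_ne_nil (a : Char) (l cur : List Char) : pvF a l cur ≠ [] := by
  induction l generalizing cur with
  | nil => simp [pvF]
  | cons c t ih => by_cases h : c = a <;> simp [pvF, h, ih]

-- ---- stage one ----
theorem pv_stage1 (text : List String) (f g : String → List Char) (acc : List Char) :
    text.foldl (fun acc line => acc ++ f line ++ ['\t'] ++ g line ++ ['\n']) acc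
    = acc ++ (text.map (fun line => f line ++ ['\t'] ++ g line ++ ['\n'])).flatten := by
  induction text generalizing acc with
  | nil => simp
  | cons l t ih =>
    simp only [List.foldl_cons]
    rw [ih]
    simp [List.append_assoc]

theorem pv_rows (sep : Char) (rs : List (List Char)) (h : rs ≠ []) :
    PySem.Chars.join [sep] rs ++ [sep] = (rs.map (· ++ [sep])).flatten := by
  induction rs with
  | nil => simp at h
  | cons r t ih =>
    cases t with
    | nil => simp [PySem.Chars.join_singleton]
    | cons r2 t2 =>
      have h2 := ih (by simp)
      rw [PySem.Chars.join_cons_cons]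
      simp only [List.append_assoc]
      rw [h2]
      simp

-- ---- stage two, A side: enumerate comprehension = pvH ' ' ----
theorem pv_join_nil (xs : List (List Char)) : PySem.Chars.join [] xs = xs.flatten := by
  induction xs with
  | nil => simp [PySem.Chars.join, List.intercalate]
  | cons x t ih =>
    cases t with
    | nil => simp [PySem.Chars.join, List.intercalate]
    | cons y u =>
      simp [PySem.Chars.join, List.intercalate] at ih ⊢
      simp [ih]

theorem pv_enum_zip (cs : List Char) :
    PySem.Chars.join [] ((PySem.List.enumerate cs 0).map (fun p =>
      if 0 < p.1 ∧ pvPunct p.2 ∧ PySem.List.pyGetD cs (p.1 - 1) ' ' ≠ ' '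
      then [' ', p.2] else [p.2]))
    = (List.zip (' ' :: cs) cs).flatMap
        (fun pc => if pvPunct pc.2 && decide (pc.1 ≠ ' ') then [' ', pc.2] else [pc.2]) := by
  have hmap : (PySem.List.enumerate cs 0).map (fun p =>
      if 0 < p.1 ∧ pvPunct p.2 ∧ PySem.List.pyGetD cs (p.1 - 1) ' ' ≠ ' '
      then [' ', p.2] else [p.2])
    = (List.zip (' ' :: cs) cs).map
      (fun pc => if pvPunct pc.2 && decide (pc.1 ≠ ' ') then [' ', pc.2] else [pc.2]) := by
    apply List.ext_getElem
    · simp [PySem.List.length_enumerate]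
    · intro i h1 h2
      simp only [List.getElem_map, PySem.List.getElem_enumerate, List.getElem_zip]
      have hi : i < cs.length := by simpa [PySem.List.length_enumerate] using h1
      cases i with
      | zero => simp
      | succ j =>
        have hj : j < cs.length := Nat.lt_of_succ_lt hi
        have h1' : ((0 : Int) + ↑(j + 1)) - 1 = (j : Int) := by push_cast; ring
        simp only [h1', PySem.List.pyGetD_natCast, List.getD_eq_getElem _ _ hj]
        have : (0 : Int) < 0 + ↑(j + 1) := by positivity
        simp [List.getElem_cons_succ, Bool.and_eq_true]
  rw [pv_join_nil, hmap, ← List.flatMap_def]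

theorem pv_zip_h (cs : List Char) (p : Char) :
    (List.zip (p :: cs) cs).flatMap
      (fun pc => if pvPunct pc.2 && decide (pc.1 ≠ ' ') then [' ', pc.2] else [pc.2])
    = pvH p cs := by
  induction cs generalizing p with
  | nil => simp [pvH]
  | cons c t ih =>
    rw [List.zip_cons_cons, List.flatMap_cons, ih]
    simp [pvH]

-- ---- stage two, B side ----
theorem pv_h_nonspace (t : List Char) (p q : Char) (hp : p ≠ ' ') (hq : q ≠ ' ') :
    pvH p t = pvH q t := by
  cases t with
  | nil => rfl
  | cons c u => simp [pvH, hp, hq]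

-- the four replaces compose to one flatMap of pvIns
theorem pv_chain (t : List Char) :
    [',', '.', '!', '?'].foldl (fun tail p => PySem.Chars.replace tail [p] [' ', p]) t
    = t.flatMap pvIns := by
  induction t with
  | nil => simp [pv_replace_single]
  | cons c u ih =>
    simp only [List.foldl_cons, List.foldl_nil, pv_replace_single] at ih ⊢
    by_cases h1 : c = ',' <;> by_cases h2 : c = '.' <;> by_cases h3 : c = '!' <;> by_cases h4 : c = '?' <;>
      simp_all [pvIns, pvPunct]

-- joint split/join invariant: B's token pass equals the one-pass reference pvH
theorem pv_main : ∀ (n : Nat) (s : List Char), s.length ≤ n →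
    (PySem.Chars.join [' '] ((pvF ' ' s []).map pvFix) = pvH ' ' s) ∧
    (∀ cur : List Char, cur ≠ [] →
      PySem.Chars.join [' '] ((pvF ' ' s cur).map pvFix)
      = cur.reverse.take 1 ++ cur.reverse.tail.flatMap pvIns ++ pvH '\t' s) := by
  intro n
  induction n with
  | zero =>
    intro s hs
    have : s = [] := List.length_eq_zero_iff.mp (Nat.le_zero.mp hs)
    subst this
    constructor
    · simp [pvF, pvFix, pvH, PySem.Chars.join, List.intercalate]
    · intro cur hcur
      obtain ⟨x, xs, hx⟩ := List.exists_cons_of_ne_nil (List.reverse_ne_nil_iff.mpr hcur)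
      simp [pvF, pvFix, pvH, PySem.Chars.join, List.intercalate, hx]
  | succ m ih =>
    intro s hs
    cases s with
    | nil =>
      constructor
      · simp [pvF, pvFix, pvH, PySem.Chars.join, List.intercalate]
      · intro cur hcur
        obtain ⟨x, xs, hx⟩ := List.exists_cons_of_ne_nil (List.reverse_ne_nil_iff.mpr hcur)
        simp [pvF, pvFix, pvH, PySem.Chars.join, List.intercalate, hx]
    | cons c t =>
      have ht : t.length ≤ m := by simpa using Nat.le_of_succ_le_succ hs
      constructor
      · -- token start (previous char was a space / string start)
        by_cases hc : c = ' '
        · subst hc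
          obtain ⟨r, rs, hr⟩ := List.exists_cons_of_ne_nil (pv_F_ne_nil ' ' t ([] : List Char))
          have h0 := (ih t ht).1
          rw [hr] at h0
          simp only [List.map_cons] at h0
          rw [pvF_cons_sep, hr]
          simp only [List.map_cons, List.reverse_nil]
          rw [PySem.Chars.join_cons_cons, h0]
          simp [pvFix, pvH, pvPunct]
        · have h0 := (ih t ht).2 [c] (by simp)
          rw [pvF_cons_ne ' ' c t [] hc, h0]
          simp [pvH, pv_h_nonspace t '\t' c (by decide) hc]
      · -- inside a token
        intro cur hcur
        obtain ⟨x, xs, hx⟩ := List.exists_cons_of_ne_nil (List.reverse_ne_nil_iff.mpr hcur)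
        by_cases hc : c = ' '
        · subst hc
          obtain ⟨r, rs, hr⟩ := List.exists_cons_of_ne_nil (pv_F_ne_nil ' ' t ([] : List Char))
          have h0 := (ih t ht).1
          rw [hr] at h0
          simp only [List.map_cons] at h0
          rw [pvF_cons_sep, hr]
          simp only [List.map_cons]
          rw [PySem.Chars.join_cons_cons, h0]
          simp [pvFix, pvH, pvPunct, List.append_assoc]
        · have h0 := (ih t ht).2 (c :: cur) (by simp)
          rw [pvF_cons_ne ' ' c t cur hc, h0]
          have hrev : (c :: cur).reverse = cur.reverse ++ [c] := by simp
          rw [hrev, hx]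
          simp [pvH, pvIns, pv_h_nonspace t c '\t' hc (by decide), List.append_assoc]
      
-- B's whole stage two equals pvH ' '
theorem pv_stage2 (cs : List Char) :
    PySem.Chars.join [' '] ((PySem.Chars.splitOn cs [' ']).map (fun tok =>
      PySem.List.slice tok none (some 1) ++
        [',', '.', '!', '?'].foldl (fun tail p => PySem.Chars.replace tail [p] [' ', p])
          (PySem.List.slice tok (some 1) none)))
    = pvH ' ' cs := by
  have hfn : (fun tok : List Char =>
      PySem.List.slice tok none (some 1) ++
        [',', '.', '!', '?'].foldl (fun tail p => PySem.Chars.replace tail [p] [' ', p])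
          (PySem.List.slice tok (some 1) none)) = pvFix := by
    funext tok
    rw [PySem.List.slice_to _ (by norm_num), PySem.List.slice_from_one, pv_chain, pvFix]
    norm_num
  rw [pv_split_single, hfn]
  exact (pv_main cs.length cs (le_refl _)).1

-- ===== VERDICT (by name: the statement is the Claim_ definition above) =====
theorem preprocess_nmt_spec : Claim_equal_preprocess_nmt := by
  intro text _ _
  unfold Spec_preprocess_nmt preprocess_nmt preprocess_nmt_alt
  have h1 : text.foldl (fun acc line =>
      acc ++ PySem.List.pyGetD (PySem.Chars.splitOn line.toList ['\t']) 0 []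
          ++ ['\t'] ++ PySem.List.pyGetD (PySem.Chars.splitOn line.toList ['\t']) 1 [] ++ ['\n']) []
      = (if text = [] then [] else
          PySem.Chars.join ['\n'] (text.map (fun line =>
            let c := PySem.Chars.splitOn line.toList ['\t']
            PySem.List.pyGetD c 0 [] ++ ['\t'] ++ PySem.List.pyGetD c 1 []))
          ++ ['\n']) := by
    cases htext : text with
    | nil => simp
    | cons l0 t0 =>
      rw [if_neg (by simp)]
      rw [pv_rows '\n' _ (by simp)]
      rw [pv_stage1]
      rw [← htext]
      simp [Function.comp_def, List.append_assoc]
  simp only [h1, pv_enum_zip, pv_zip_h, pv_stage2]
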